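-- pv_equiv track=rewrite | github.com/IGBSID/WarrantyClaim-OCR | bridgestone-tyre-bs-ocr-deployment-repo/training_pipeline/matching_score_code.py | str_matcher
-- ===== SOURCE A (Python) =====
-- def str_matcher(tag_gt, tag_pred, N=4):
--     ind = -1
--     count = 0
--     for c in tag_pred:
--         if c == "-":
--             continue
--         ind = tag_gt.find(c, ind+1)
--         if ind != -1:
--             count += 1
--     if count > N:
--         return "Yes"
--     return "No"
-- ===== SOURCE B (Python) =====
-- def str_matcher(tag_gt, tag_pred, N=4):
--     # index tag_gt once: for each char, the increasing list of its positions
--     pos = {}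
--     for i, c in enumerate(tag_gt):
--         if c in pos:
--             pos[c].append(i)
--         else:
--             pos[c] = [i]
--     ind = -1
--     count = 0
--     for c in tag_pred:
--         if c == "-":
--             continue
--         lst = pos.get(c)
--         if lst is None:
--             ind = -1
--             continue
--         # binary search: first position in lst that is >= ind + 1
--         t = ind + 1
--         lo, hi = 0, len(lst)
--         while lo < hi:
--             mid = (lo + hi) // 2
--             if lst[mid] < t:
--                 lo = mid + 1
--             else:
--                 hi = mid
--         if lo < len(lst):
--             ind = lst[lo]
--             count += 1
--         else:
--             ind = -1
--     if count > N:
--         return "Yes"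
--     return "No"
-- ===== Notes on version B (the rewrite author's own statement) =====
-- stated objective: alternative
-- what changed: B builds a per-character sorted position index of tag_gt once and replaces A's repeated linear tag_gt.find(c, ind+1) scan by a hand-written binary search for the first indexed position >= ind+1.
import Mathlib
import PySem

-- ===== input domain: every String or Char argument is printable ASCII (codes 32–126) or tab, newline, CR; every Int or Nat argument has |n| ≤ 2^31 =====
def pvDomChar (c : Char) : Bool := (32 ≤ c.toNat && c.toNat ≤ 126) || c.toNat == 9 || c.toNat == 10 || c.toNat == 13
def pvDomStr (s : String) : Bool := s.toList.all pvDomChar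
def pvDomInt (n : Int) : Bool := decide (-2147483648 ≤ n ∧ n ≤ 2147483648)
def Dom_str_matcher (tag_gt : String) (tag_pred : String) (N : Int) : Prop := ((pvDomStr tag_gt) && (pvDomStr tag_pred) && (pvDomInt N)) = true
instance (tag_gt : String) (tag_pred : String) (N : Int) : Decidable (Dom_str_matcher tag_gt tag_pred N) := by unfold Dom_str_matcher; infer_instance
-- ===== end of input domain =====

-- ===== PORT A =====
-- B replaces A's per-character linear string scan by a per-char position index plus binary search.
-- A-side helper: A's loop body (skip '-', else ind = tag_gt.find(c, ind+1), count += 1 if found)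
def pvStepA (tag_gt : String) (st : Int × Int) (c : Char) : Int × Int :=
  if c = '-' then st
  else
    let ind := PySem.Str.findFrom tag_gt (String.ofList [c]) (st.1 + 1) none
    (ind, if ind ≠ -1 then st.2 + 1 else st.2)

def str_matcher (tag_gt : String) (tag_pred : String) (N : Int) : String :=
  let st := tag_pred.toList.foldl (pvStepA tag_gt) (-1, 0)
  if st.2 > N then "Yes" else "No"

-- ===== PORT B =====
-- B-side helper: body of the indexing loop (pos[c].append(i) on the existing list, else pos[c] = [i])
def pvIndexStep (d : PySem.Dict Char (List Int)) (p : Int × Char) : PySem.Dict Char (List Int) :=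
  if d.contains p.2 then d.insert p.2 (d.getD p.2 [] ++ [p.1])
  else d.insert p.2 [p.1]

-- 'for i, c in enumerate(tag_gt): ...' building char -> increasing list of positions
def pvIndex (tag_gt : String) : PySem.Dict Char (List Int) :=
  (PySem.List.enumerate tag_gt.toList 0).foldl pvIndexStep PySem.Dict.empty

-- Source B's hand-written while-loop binary search (first index in lst[lo:hi] with value >= t);
-- Python's lst[mid] is ported as getD lst mid 0, exact because every call keeps mid < hi <= lst.length
def pvBisect (lst : List Int) (t : Int) (lo hi : Nat) : Nat :=
  if lo < hi then
    if lst.getD ((lo + hi) / 2) 0 < t then pvBisect lst t ((lo + hi) / 2 + 1) hi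
    else pvBisect lst t lo ((lo + hi) / 2)
  else lo
termination_by hi - lo
decreasing_by all_goals omega

-- B-side helper: B's loop body over tag_pred
def pvStepB (pos : PySem.Dict Char (List Int)) (st : Int × Int) (c : Char) : Int × Int :=
  if c = '-' then st
  else
    match pos.get? c with
    | none => (-1, st.2)
    | some lst =>
      let lo := pvBisect lst (st.1 + 1) 0 lst.length
      if lo < lst.length then (lst.getD lo 0, st.2 + 1) else (-1, st.2)

def str_matcher_alt (tag_gt : String) (tag_pred : String) (N : Int) : String :=
  let pos := pvIndex tag_gt
  let st := tag_pred.toList.foldl (pvStepB pos) (-1, 0)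
  if st.2 > N then "Yes" else "No"

-- ===== PRECONDITION & SPEC =====
def Spec_str_matcher (tag_gt : String) (tag_pred : String) (N : Int) (out : String) : Prop := out = str_matcher_alt tag_gt tag_pred N
instance (tag_gt : String) (tag_pred : String) (N : Int) (out : String) : Decidable (Spec_str_matcher tag_gt tag_pred N out) := by unfold Spec_str_matcher; infer_instance

-- ===== CLAIM (what is proved, stated in full; the proofs are below) =====
def Claim_equal_str_matcher : Prop := ∀ (tag_gt : String) (tag_pred : String) (N : Int), Dom_str_matcher tag_gt tag_pred N → Spec_str_matcher tag_gt tag_pred N (str_matcher tag_gt tag_pred N)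

-- ===== LEMMAS AND PROOFS =====

-- positions (as Ints, offset k) of c in l, in increasing order
def pvOcc : List Char → Int → Char → List Int
  | [], _, _ => []
  | x :: xs, k, c => (if x = c then [k] else []) ++ pvOcc xs (k + 1) c

lemma pvIndexStep_eq (d : PySem.Dict Char (List Int)) (p : Int × Char) :
    pvIndexStep d p = d.insert p.2 (d.getD p.2 [] ++ [p.1]) := by
  unfold pvIndexStep
  split
  · rfl
  · rename_i h
    rw [PySem.Dict.getD_of_not_contains _ _ (by simpa using h), List.nil_append]

lemma pvIndex_get?_aux (l : List Char) : ∀ (k : Int) (d : PySem.Dict Char (List Int)) (c : Char),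
    ((PySem.List.enumerate l k).foldl pvIndexStep d).get? c =
      match d.get? c with
      | some v => some (v ++ pvOcc l k c)
      | none => if pvOcc l k c = [] then none else some (pvOcc l k c) := by
  induction l with
  | nil =>
    intro k d c
    simp only [PySem.List.enumerate_nil, List.foldl_nil, pvOcc]
    cases d.get? c <;> simp
  | cons x xs ih =>
    intro k d c
    rw [PySem.List.enumerate_cons, List.foldl_cons, pvIndexStep_eq, ih]
    by_cases hx : x = c
    · subst hx
      rw [PySem.Dict.get?_insert_self, PySem.Dict.getD_eq_get?_getD]
      simp only [pvOcc]
      cases d.get? x <;> simp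
    · rw [PySem.Dict.get?_insert_of_ne _ _ (fun h => hx h.symm)]
      simp only [pvOcc, if_neg hx, List.nil_append]

lemma pvIndex_get? (tag_gt : String) (c : Char) :
    (pvIndex tag_gt).get? c =
      if pvOcc tag_gt.toList 0 c = [] then none else some (pvOcc tag_gt.toList 0 c) := by
  unfold pvIndex
  rw [pvIndex_get?_aux]
  simp [PySem.Dict.get?_empty]

lemma pvOcc_mem (l : List Char) : ∀ (k : Int) (c : Char) (j : Int),
    j ∈ pvOcc l k c ↔ ∃ (m : Nat) (h : m < l.length), j = k + m ∧ l[m] = c := by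
  induction l with
  | nil => intro k c j; simp [pvOcc]
  | cons x xs ih =>
    intro k c j
    simp only [pvOcc, List.mem_append, ih]
    constructor
    · rintro (hj | ⟨m, hm, rfl, hc⟩)
      · split at hj
        · rename_i hx
          simp at hj
          exact ⟨0, by simp, by simp [hj], by simpa using hx⟩
        · simp at hj
      · exact ⟨m + 1, by simp only [List.length_cons]; omega, by push_cast; ring, by simpa using hc⟩
    · rintro ⟨m, hm, rfl, hc⟩
      cases m with
      | zero => left; simp at hc; simp [hc]
      | succ m =>
        right
        simp only [List.length_cons] at hm
        exact ⟨m, by omega, by push_cast; ring, by simpa using hc⟩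

lemma pvOcc_lb (l : List Char) : ∀ (k : Int) (c : Char) (j : Int), j ∈ pvOcc l k c → k ≤ j := by
  intro k c j hj
  obtain ⟨m, hm, rfl, -⟩ := (pvOcc_mem l k c j).mp hj
  omega

lemma pvOcc_sorted (l : List Char) : ∀ (k : Int) (c : Char), (pvOcc l k c).Pairwise (· < ·) := by
  induction l with
  | nil => intro k c; simp [pvOcc]
  | cons x xs ih =>
    intro k c
    simp only [pvOcc]
    refine List.pairwise_append.mpr ⟨?_, ih (k + 1) c, ?_⟩
    · split <;> simp
    · intro a ha b hb
      have hb' := pvOcc_lb xs (k + 1) c b hb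
      split at ha
      · simp at ha; omega
      · simp at ha

-- lower-bound property of the binary search on a (weakly) sorted list
lemma pvBisect_spec (lst : List Int) (t : Int) (hs : lst.Pairwise (· ≤ ·)) :
    ∀ (fuel lo hi : Nat), hi - lo ≤ fuel → lo ≤ hi → hi ≤ lst.length →
      lo ≤ pvBisect lst t lo hi ∧ pvBisect lst t lo hi ≤ hi ∧
      (∀ i, lo ≤ i → i < pvBisect lst t lo hi → lst.getD i 0 < t) ∧
      (pvBisect lst t lo hi < hi → t ≤ lst.getD (pvBisect lst t lo hi) 0) := by
  intro fuel
  induction fuel with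
  | zero =>
    intro lo hi hf hlo hhi
    have : hi = lo := by omega
    subst this
    rw [pvBisect]
    simp only [lt_irrefl, if_false]
    exact ⟨le_refl _, le_refl _, fun i h1 h2 => absurd (lt_of_le_of_lt h1 h2) (lt_irrefl _),
      fun h => h.elim⟩
  | succ n ih =>
    intro lo hi hf hlo hhi
    rw [pvBisect]
    by_cases hlt : lo < hi
    · rw [if_pos hlt]
      have hmid1 : lo ≤ (lo + hi) / 2 := by omega
      have hmid2 : (lo + hi) / 2 < hi := by omega
      by_cases hcmp : lst.getD ((lo + hi) / 2) 0 < t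
      · rw [if_pos hcmp]
        obtain ⟨h1, h2, h3, h4⟩ := ih ((lo + hi) / 2 + 1) hi (by omega) (by omega) hhi
        refine ⟨by omega, h2, ?_, h4⟩
        intro i hi1 hi2
        by_cases hcase : (lo + hi) / 2 + 1 ≤ i
        · exact h3 i hcase hi2
        · have hi3 : i ≤ (lo + hi) / 2 := by omega
          have hilen : i < lst.length := by omega
          have hmlen : (lo + hi) / 2 < lst.length := by omega
          rw [List.getD_eq_getElem lst 0 hilen]
          rcases Nat.lt_or_ge i ((lo + hi) / 2) with hlt' | hge
          · have := (List.pairwise_iff_getElem.mp hs) i ((lo + hi) / 2) hilen hmlen hlt'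
            rw [List.getD_eq_getElem lst 0 hmlen] at hcmp
            omega
          · have : i = (lo + hi) / 2 := by omega
            subst this
            rw [← List.getD_eq_getElem lst 0 hilen]
            exact hcmp
      · rw [if_neg hcmp]
        obtain ⟨h1, h2, h3, h4⟩ := ih lo ((lo + hi) / 2) (by omega) (by omega) (by omega)
        refine ⟨h1, by omega, h3, ?_⟩
        intro hr
        by_cases hcase : pvBisect lst t lo ((lo + hi) / 2) < (lo + hi) / 2
        · exact h4 hcase
        · have : pvBisect lst t lo ((lo + hi) / 2) = (lo + hi) / 2 := by omega
          rw [this]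
          omega
    · rw [if_neg hlt]
      exact ⟨le_refl _, by omega, fun i h1 h2 => absurd (lt_of_le_of_lt h1 h2) (lt_irrefl _),
      fun h => absurd h hlt⟩

-- single-character find = findIdx?
lemma pvFind_single (l : List Char) (c : Char) :
    PySem.Chars.find l [c] = match l.findIdx? (fun x => x == c) with
      | none => -1
      | some m => (m : Int) := by
  have hpre : ∀ (l' : List Char) (i : Nat), ([c] <+: l'.drop i) ↔ l'[i]? = some c := by
    intro l' i
    rw [← List.head?_drop]
    cases hd : l'.drop i with
    | nil => simp
    | cons a t =>
      simp only [List.cons_prefix_cons, List.nil_prefix, and_true, List.head?_cons,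
        Option.some.injEq]
      exact ⟨fun h => h.symm, fun h => h.symm⟩
  cases hidx : l.findIdx? (fun x => x == c) with
  | none =>
    simp only []
    rw [PySem.Chars.find_eq_neg_one_iff, List.singleton_infix_iff]
    intro hc
    have := List.findIdx?_eq_none_iff.mp hidx c hc
    simp at this
  | some m =>
    simp only []
    obtain ⟨hm, hpm, hmin⟩ := List.findIdx?_eq_some_iff_getElem.mp hidx
    have hc : l[m] = c := by simpa using hpm
    have hinf : [c] <:+: l := (List.singleton_infix_iff c l).mpr (hc ▸ List.getElem_mem hm)
    have hnn : 0 ≤ PySem.Chars.find l [c] := (PySem.Chars.find_nonneg_iff l [c]).mpr hinf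
    obtain ⟨hfind, hfmin⟩ := PySem.Chars.find_spec hnn
    have hf1 : l[(PySem.Chars.find l [c]).toNat]? = some c := (hpre l _).mp hfind
    have hflen : (PySem.Chars.find l [c]).toNat < l.length := by
      by_contra hge
      rw [List.getElem?_eq_none (by omega)] at hf1
      simp at hf1
    have h1 : m ≤ (PySem.Chars.find l [c]).toNat := by
      by_contra hgt
      have := hmin (PySem.Chars.find l [c]).toNat (by omega)
      simp only [List.getElem?_eq_getElem hflen, Option.some.injEq] at hf1
      simp [hf1] at this
    have h2 : (PySem.Chars.find l [c]).toNat ≤ m := by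
      by_contra hgt
      exact hfmin m (by omega) ((hpre l m).mpr (by simp [List.getElem?_eq_getElem hm, hc]))
    omega

-- the two loop bodies agree and preserve the range invariant on ind
lemma pvStep_eq (tag_gt : String) (c : Char) (st : Int × Int)
    (h0 : -1 ≤ st.1) (h1 : st.1 < (tag_gt.toList.length : Int)) :
    pvStepA tag_gt st c = pvStepB (pvIndex tag_gt) st c ∧
    -1 ≤ (pvStepA tag_gt st c).1 ∧ (pvStepA tag_gt st c).1 < (tag_gt.toList.length : Int) := by
  by_cases hc : c = '-'
  · subst hc
    unfold pvStepA pvStepB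
    rw [if_pos rfl, if_pos rfl]
    exact ⟨rfl, h0, h1⟩
  have hg0 : (0 : Int) ≤ (tag_gt.toList.length : Int) := by omega
  set g := tag_gt.toList with hg
  set t : Nat := (st.1 + 1).toNat with ht
  have htc : st.1 + 1 = (t : Int) := by omega
  have htle : t ≤ g.length := by omega
  -- A's lookup, rephrased through findIdx? on the dropped suffix
  have hA : PySem.Str.findFrom tag_gt (String.ofList [c]) (st.1 + 1) none
      = match (g.drop t).findIdx? (fun x => x == c) with
        | none => -1
        | some m => ((t + m : Nat) : Int) := by
    rw [PySem.Str.findFrom_eq]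
    simp only [String.toList_ofList]
    rw [htc, PySem.Chars.findFrom_natCast g [c] t htle, pvFind_single]
    cases hidx : (g.drop t).findIdx? (fun x => x == c) with
    | none => simp
    | some m =>
      show (if ((m : Nat) : Int) = -1 then (-1 : Int) else (t : Int) + ((m : Nat) : Int))
          = ((t + m : Nat) : Int)
      rw [if_neg (by omega : ¬ ((m : Nat) : Int) = -1)]
      push_cast
      ring
  by_cases hocc : pvOcc g 0 c = []
  · -- c occurs nowhere in tag_gt: both sides yield ind = -1, count unchanged
    have hget : (pvIndex tag_gt).get? c = none := by
      rw [pvIndex_get?, ← hg, if_pos hocc]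
    have hnC : c ∉ g := by
      intro hmem
      obtain ⟨m, hm, hgm⟩ := List.mem_iff_getElem.mp hmem
      have : (m : Int) ∈ pvOcc g 0 c :=
        (pvOcc_mem g 0 c (m : Int)).mpr ⟨m, hm, by simp, hgm⟩
      rw [hocc] at this
      simp at this
    have hidx : (g.drop t).findIdx? (fun x => x == c) = none := by
      rw [List.findIdx?_eq_none_iff]
      intro x hx
      simp only [beq_eq_false_iff_ne, ne_eq]
      rintro rfl
      exact hnC (List.mem_of_mem_drop hx)
    have hAv : PySem.Str.findFrom tag_gt (String.ofList [c]) (st.1 + 1) none = -1 := by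
      rw [hA, hidx]
    have hSA : pvStepA tag_gt st c = (-1, st.2) := by
      unfold pvStepA
      rw [if_neg hc]
      simp only [hAv, ne_eq, not_true, if_false]
    have hSB : pvStepB (pvIndex tag_gt) st c = (-1, st.2) := by
      unfold pvStepB
      rw [if_neg hc, hget]
    refine ⟨hSA.trans hSB.symm, by rw [hSA], ?_⟩
    rw [hSA]
    show (-1 : Int) < (g.length : Int)
    omega
  · -- c occurs in tag_gt: dict lookup succeeds, binary search finds the lower bound
    set occ := pvOcc g 0 c with hoccdef
    have hget : (pvIndex tag_gt).get? c = some occ := by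
      rw [pvIndex_get?, ← hg, if_neg hocc]
    have hs' : occ.Pairwise (· ≤ ·) := (pvOcc_sorted g 0 c).imp le_of_lt
    obtain ⟨hlo0, hlohi, hbelow, hat⟩ :=
      pvBisect_spec occ (st.1 + 1) hs' occ.length 0 occ.length (by omega) (by omega) (le_refl _)
    set lo := pvBisect occ (st.1 + 1) 0 occ.length with hlodef
    by_cases hlt : lo < occ.length
    · -- found: the lo-th occurrence is the first position ≥ ind + 1
      have hmemlo : occ.getD lo 0 ∈ occ := by
        rw [List.getD_eq_getElem occ 0 hlt]
        exact List.getElem_mem hlt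
      obtain ⟨m, hm, hjm, hgm⟩ := (pvOcc_mem g 0 c _).mp hmemlo
      have hjm' : occ.getD lo 0 = (m : Int) := by rw [hjm]; ring
      have htm : t ≤ m := by
        have := hat hlt
        rw [hjm'] at this
        omega
      have hmin : ∀ (i : Nat) (hilen : i < g.length), t ≤ i → i < m → g[i]'hilen ≠ c := by
        intro i hilen hit him hgi
        have hiocc : ((i : Nat) : Int) ∈ occ :=
          (pvOcc_mem g 0 c (i : Int)).mpr ⟨i, hilen, by simp, hgi⟩
        obtain ⟨j, hj, hjv⟩ := List.mem_iff_getElem.mp hiocc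
        rcases Nat.lt_or_ge j lo with hjlo | hjlo
        · have := hbelow j (Nat.zero_le _) hjlo
          rw [List.getD_eq_getElem occ 0 hj, hjv] at this
          omega
        · have hle : occ.getD lo 0 ≤ occ[j] := by
            rcases Nat.eq_or_lt_of_le hjlo with heq | hlt'
            · subst heq
              exact (List.getD_eq_getElem occ 0 hlt).le
            · rw [List.getD_eq_getElem occ 0 hlt]
              exact (List.pairwise_iff_getElem.mp hs') lo j hlt hj hlt'
          rw [hjv, hjm'] at hle
          omega
      have hidx : (g.drop t).findIdx? (fun x => x == c) = some (m - t) := by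
        rw [List.findIdx?_eq_some_iff_getElem]
        have hdl : m - t < (g.drop t).length := by simp only [List.length_drop]; omega
        refine ⟨hdl, ?_, ?_⟩
        · have he : (g.drop t)[m - t] = g[t + (m - t)]'(by omega) := List.getElem_drop
          rw [he]
          have h2 : t + (m - t) = m := by omega
          simp only [h2]
          simp [hgm]
        · intro j hj
          have hjlen : t + j < g.length := by simp only [List.length_drop] at hdl; omega
          have he : (g.drop t)[j]'(by simp only [List.length_drop]; omega) = g[t + j]'hjlen :=
            List.getElem_drop
          rw [he]
          simp only [beq_iff_eq]
          exact hmin (t + j) hjlen (by omega) (by omega)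
      have hAv : PySem.Str.findFrom tag_gt (String.ofList [c]) (st.1 + 1) none = (m : Int) := by
        rw [hA, hidx]
        show ((t + (m - t) : Nat) : Int) = (m : Int)
        omega
      have hSA : pvStepA tag_gt st c = ((m : Int), st.2 + 1) := by
        unfold pvStepA
        rw [if_neg hc]
        simp only [hAv, ne_eq]
        rw [if_pos (by omega : ¬ ((m : Int) = -1))]
      have hSB : pvStepB (pvIndex tag_gt) st c = ((m : Int), st.2 + 1) := by
        unfold pvStepB
        rw [if_neg hc, hget]
        dsimp only
        rw [← hlodef, if_pos hlt, hjm']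
      refine ⟨hSA.trans hSB.symm, ?_, ?_⟩
      · rw [hSA]
        show (-1 : Int) ≤ (m : Int)
        omega
      · rw [hSA]
        show ((m : Nat) : Int) < (g.length : Int)
        omega
    · -- not found: everything in occ is < ind + 1, so no occurrence at or after ind + 1
      have hall : ∀ j, j < occ.length → occ.getD j 0 < st.1 + 1 := by
        intro j hj
        have : lo = occ.length := by omega
        exact hbelow j (Nat.zero_le _) (by omega)
      have hidx : (g.drop t).findIdx? (fun x => x == c) = none := by
        rw [List.findIdx?_eq_none_iff]
        intro x hx
        obtain ⟨i, hi, hiv⟩ := List.mem_iff_getElem.mp hx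
        have hilen : t + i < g.length := by simp only [List.length_drop] at hi; omega
        have hdi : (g.drop t)[i] = g[t + i]'hilen := List.getElem_drop
        simp only [beq_eq_false_iff_ne, ne_eq]
        intro hxc
        have hiocc : ((t + i : Nat) : Int) ∈ occ :=
          (pvOcc_mem g 0 c _).mpr ⟨t + i, hilen, by simp, by rw [← hdi, hiv]; exact hxc⟩
        obtain ⟨j, hj, hjv⟩ := List.mem_iff_getElem.mp hiocc
        have := hall j hj
        rw [List.getD_eq_getElem occ 0 hj, hjv] at this
        omega
      have hAv : PySem.Str.findFrom tag_gt (String.ofList [c]) (st.1 + 1) none = -1 := by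
        rw [hA, hidx]
      have hSA : pvStepA tag_gt st c = (-1, st.2) := by
        unfold pvStepA
        rw [if_neg hc]
        simp only [hAv, ne_eq, not_true, if_false]
      have hSB : pvStepB (pvIndex tag_gt) st c = (-1, st.2) := by
        unfold pvStepB
        rw [if_neg hc, hget]
        dsimp only
        rw [← hlodef, if_neg hlt]
      refine ⟨hSA.trans hSB.symm, by rw [hSA], ?_⟩
      rw [hSA]
      show (-1 : Int) < (g.length : Int)
      omega

lemma pvFold_eq (tag_gt : String) (l : List Char) : ∀ (st : Int × Int),
    -1 ≤ st.1 → st.1 < (tag_gt.toList.length : Int) →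
    l.foldl (pvStepA tag_gt) st = l.foldl (pvStepB (pvIndex tag_gt)) st := by
  induction l with
  | nil => intro st _ _; rfl
  | cons x xs ih =>
    intro st h0 h1
    obtain ⟨heq, h0', h1'⟩ := pvStep_eq tag_gt x st h0 h1
    simp only [List.foldl_cons]
    rw [← heq, ih _ h0' h1']

-- ===== VERDICT (by name: the statement is the Claim_ definition above) =====
theorem str_matcher_spec : Claim_equal_str_matcher := by
  intro tag_gt tag_pred N _
  unfold Spec_str_matcher str_matcher str_matcher_alt
  rw [pvFold_eq tag_gt tag_pred.toList (-1, 0) (by norm_num) (by omega)]
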